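-- pv_equiv track=rewrite | github.com/noahcladera/AceHUB | tennis-stroke-detection/src/merged_tennis_processor.py | get_stroke_segments
-- ===== SOURCE A (Python) =====
-- def get_stroke_segments(labels):
--     """
--     Extract stroke segments from frame labels.
--
--     Args:
--         labels (list): List of (frame_index, stroke_label) tuples
--
--     Returns:
--         list: List of (start_frame, end_frame) tuples for each stroke segment
--     """
--     segments = []
--     current_label = 0
--     start_frame = None
--
--     for frame, label in labels:
--         if label != current_label:
--             if current_label > 0 and start_frame is not None:
--                 # End of a stroke segment
--                 segments.append((start_frame, frame - 1))
--
--             if label > 0: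
--                 # Start of a new stroke segment
--                 start_frame = frame
--             else:
--                 start_frame = None
--
--             current_label = label
--
--     # Handle the last segment if it extends to the end
--     if current_label > 0 and start_frame is not None:
--         segments.append((start_frame, labels[-1][0]))
--
--     return segments
-- ===== SOURCE B (Python) =====
-- def get_stroke_segments(labels):
--     # Phase 1: collapse into runs of consecutive equal labels: (label, first_frame)
--     runs = []
--     for frame, label in labels:
--         if not runs or runs[-1][0] != label:
--             runs.append((label, frame))
--     # Phase 2: each positive run becomes a segment ending just before the next run
--     segments = []
--     for i, (label, first) in enumerate(runs):
--         if label > 0: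
--             end = runs[i + 1][1] - 1 if i + 1 < len(runs) else labels[-1][0]
--             segments.append((first, end))
--     return segments
-- ===== Notes on version B (the rewrite author's own statement) =====
-- stated objective: idiomatic
-- what changed: Replaced A's single stateful transition-tracking pass (current_label/start_frame state machine with an end-of-loop fixup) by a two-phase group-then-lookahead computation: first collapse the list into runs of consecutive equal labels, then emit one segment per positive run ending just before the next run.
import Mathlib
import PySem

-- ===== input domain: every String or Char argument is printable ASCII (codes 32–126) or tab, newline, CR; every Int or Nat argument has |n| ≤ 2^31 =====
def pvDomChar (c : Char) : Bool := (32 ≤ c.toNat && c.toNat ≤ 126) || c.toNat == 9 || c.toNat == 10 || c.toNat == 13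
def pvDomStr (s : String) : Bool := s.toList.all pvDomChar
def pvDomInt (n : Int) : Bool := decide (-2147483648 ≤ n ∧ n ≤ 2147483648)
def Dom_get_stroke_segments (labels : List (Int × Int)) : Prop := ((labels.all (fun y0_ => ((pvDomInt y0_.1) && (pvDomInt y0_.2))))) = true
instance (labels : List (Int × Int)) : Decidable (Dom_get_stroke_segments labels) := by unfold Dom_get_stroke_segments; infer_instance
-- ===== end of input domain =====

-- B replaces A's single stateful transition-tracking pass by an idiomatic two-phase
-- group-then-lookahead computation (build runs of equal labels, then emit a segment per
-- positive run); same cost, objective: idiomatic.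

-- ===== PORT A =====
-- one loop step of A: state = (segments, current_label, start_frame)
def pvStepA (st : List (Int × Int) × Int × Option Int) (p : Int × Int) :
    List (Int × Int) × Int × Option Int :=
  match st, p with
  | (segs, cl, sf), (f, l) =>
    if l ≠ cl then
      (( if cl > 0 then
           match sf with
           | some s => segs ++ [(s, f - 1)]
           | none => segs
         else segs),
       l,
       (if l > 0 then some f else none))
    else (segs, cl, sf)

def get_stroke_segments (labels : List (Int × Int)) : List (Int × Int) :=
  match labels.foldl pvStepA ([], 0, none) with
  | (segs, cl, sf) =>
    if cl > 0 then
      match sf with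
      | some s =>
          -- labels[-1][0]; the none branch is unreachable (cl > 0 forces labels ≠ [])
          segs ++ [(s, (match PySem.List.pyGet? labels (-1) with
                        | some p => p.1
                        | none => 0))]
      | none => segs
    else segs

-- ===== PORT B =====
-- phase 1 step: append a run (label, first_frame) when the label changes
def pvRunStep (runs : List (Int × Int)) (p : Int × Int) : List (Int × Int) :=
  match runs.getLast? with
  | none => runs ++ [(p.2, p.1)]
  | some r => if r.1 ≠ p.2 then runs ++ [(p.2, p.1)] else runs

-- phase 2: each positive run ends just before the next run's first frame, the last at d
def pvSegsOf : List (Int × Int) → Int → List (Int × Int)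
  | [], _ => []
  | (l, f) :: rest, d =>
      (if l > 0 then
         [(f, match rest with
              | (_, f2) :: _ => f2 - 1
              | [] => d)]
       else []) ++ pvSegsOf rest d

def get_stroke_segments_alt (labels : List (Int × Int)) : List (Int × Int) :=
  pvSegsOf (labels.foldl pvRunStep [])
    (match PySem.List.pyGet? labels (-1) with
     | some p => p.1
     | none => 0)

-- ===== PRECONDITION & SPEC =====
def Spec_get_stroke_segments (labels : List (Int × Int)) (out : List (Int × Int)) : Prop := out = get_stroke_segments_alt labels
instance (labels : List (Int × Int)) (out : List (Int × Int)) : Decidable (Spec_get_stroke_segments labels out) := by unfold Spec_get_stroke_segments; infer_instance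

-- ===== CLAIM (what is proved, stated in full; the proofs are below) =====
def Claim_equal_get_stroke_segments : Prop := ∀ (labels : List (Int × Int)), Dom_get_stroke_segments labels → Spec_get_stroke_segments labels (get_stroke_segments labels)

-- ===== LEMMAS AND PROOFS =====

-- recursive form of B's phase 1, with an open run of label cl
def pvRunsC : List (Int × Int) → Int → List (Int × Int)
  | [], _ => []
  | (f, l) :: rest, cl =>
      if l = cl then pvRunsC rest cl else (l, f) :: pvRunsC rest l

-- A's finalization with the last frame abstracted as d
def pvFinA (st : List (Int × Int) × Int × Option Int) (d : Int) : List (Int × Int) :=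
  match st with
  | (segs, cl, sf) =>
    if cl > 0 then
      match sf with
      | some s => segs ++ [(s, d)]
      | none => segs
    else segs

lemma pvRuns_fold (rest : List (Int × Int)) :
    ∀ (acc : List (Int × Int)) (cl first : Int),
      List.foldl pvRunStep (acc ++ [(cl, first)]) rest
        = (acc ++ [(cl, first)]) ++ pvRunsC rest cl := by
  induction rest with
  | nil => intro acc cl first; simp [pvRunsC]
  | cons p rest ih =>
      intro acc cl first
      obtain ⟨f, l⟩ := p
      by_cases h : l = cl
      · subst h
        simp [pvRunStep, pvRunsC, ih]
      · have : pvRunStep (acc ++ [(cl, first)]) (f, l)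
            = (acc ++ [(cl, first)]) ++ [(l, f)] := by
          simp [pvRunStep, Ne.symm h]
        calc List.foldl pvRunStep (acc ++ [(cl, first)]) ((f, l) :: rest)
            = List.foldl pvRunStep ((acc ++ [(cl, first)]) ++ [(l, f)]) rest := by
              simp [List.foldl, this]
          _ = ((acc ++ [(cl, first)]) ++ [(l, f)]) ++ pvRunsC rest l := ih _ _ _
          _ = (acc ++ [(cl, first)]) ++ pvRunsC ((f, l) :: rest) cl := by
              simp [pvRunsC, h]

-- main invariant: A's fold+finalize from an open-run state equals B's phase 2 on the runs
lemma pvMain (rest : List (Int × Int)) :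
    ∀ (segs : List (Int × Int)) (cl first d : Int),
      pvFinA (List.foldl pvStepA (segs, cl, if cl > 0 then some first else none) rest) d
        = segs ++ pvSegsOf ((cl, first) :: pvRunsC rest cl) d := by
  induction rest with
  | nil =>
      intro segs cl first d
      by_cases h : cl > 0 <;> simp [pvFinA, pvSegsOf, pvRunsC, h]
  | cons p rest ih =>
      intro segs cl first d
      obtain ⟨f, l⟩ := p
      by_cases h : l = cl
      · subst h
        have hs : pvStepA (segs, l, if l > 0 then some first else none) (f, l)
            = (segs, l, if l > 0 then some first else none) := by
          simp [pvStepA]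
        rw [List.foldl_cons, hs, ih]
        simp [pvRunsC]
      · have hs : pvStepA (segs, cl, if cl > 0 then some first else none) (f, l)
            = (segs ++ (if cl > 0 then [(first, f - 1)] else []), l,
               if l > 0 then some f else none) := by
          by_cases hcl : cl > 0 <;> simp [pvStepA, h, hcl]
        rw [List.foldl_cons, hs, ih]
        by_cases hcl : cl > 0 <;>
          simp [pvSegsOf, pvRunsC, h, hcl, List.append_assoc]

-- ===== VERDICT (by name: the statement is the Claim_ definition above) =====
theorem get_stroke_segments_spec : Claim_equal_get_stroke_segments := by
  intro labels _
  show get_stroke_segments labels = get_stroke_segments_alt labels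
  cases labels with
  | nil => rfl
  | cons p rest =>
      obtain ⟨f, l⟩ := p
      set d : Int := (match PySem.List.pyGet? ((f, l) :: rest) (-1) with
                      | some p => p.1
                      | none => 0) with hd
      have hA : get_stroke_segments ((f, l) :: rest)
          = pvFinA (List.foldl pvStepA ([], 0, none) ((f, l) :: rest)) d := by
        simp [get_stroke_segments, pvFinA, hd]
      have h0 : (none : Option Int) = if (0 : Int) > 0 then some 0 else none := by simp
      rw [hA, h0, pvMain]
      have hB : get_stroke_segments_alt ((f, l) :: rest)
          = pvSegsOf ([(l, f)] ++ pvRunsC rest l) d := by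
        have := pvRuns_fold rest ([] : List (Int × Int)) l f
        simp only [get_stroke_segments_alt, List.foldl_cons] at *
        simp only [pvRunStep, List.getLast?_nil, List.nil_append] at *
        rw [this, hd]
      rw [hB]
      by_cases h : l = 0
      · subst h; simp [pvRunsC, pvSegsOf]
      · simp [pvRunsC, h, pvSegsOf]
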